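-- pv_equiv track=rewrite | github.com/scwatts/hicap | hi_capsule.py | select_locus_sequences
-- ===== SOURCE A (Python) =====
-- def select_locus_sequences(locus_sequences):
--     # Iteratively select best alignments
--     alignment_score_groups = dict()
--     for alignment in locus_sequences:
--         try:
--             alignment_score_groups[len(alignment)].append(alignment)
--         except KeyError:
--             alignment_score_groups[len(alignment)] = [alignment]
--     best_alignments = list()
--     for score_group in sorted(alignment_score_groups, reverse=True):
--         # This is not efficient
--         for alignment in alignment_score_groups[score_group]:
--             # Exclude alignments shorter than 2 genes
--             if len(alignment) < 3:
--                 continue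
--             # Only record alignment if there is no overlap with previously added alignment
--             if not any(p in a for a in best_alignments for p in alignment):
--                 best_alignments.append(alignment)
--     return best_alignments
-- ===== SOURCE B (Python) =====
-- def select_locus_sequences(locus_sequences):
--     # Selection by repeated extraction: no length-keyed index and no sort at all.
--     # Filter once to alignments of >= 3 genes; then repeatedly take the longest
--     # remaining candidate (max is stable: first maximum wins, the same tie order
--     # as A's bucket appends) and discard every candidate sharing a gene with it.
--     candidates = [alignment for alignment in locus_sequences if len(alignment) >= 3]
--     best_alignments = []
--     while candidates:
--         pick = max(candidates, key=len)
--         best_alignments.append(pick)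
--         picked = set(pick)
--         candidates = [a for a in candidates if not any(p in picked for p in a)]
--     return best_alignments
-- ===== Notes on version B (the rewrite author's own statement) =====
-- stated objective: faster
-- what changed: Replaces the length-keyed bucket dict plus sorted-keys nested traversal by a selection-by-extraction loop: filter short alignments once, then repeatedly take the longest remaining candidate with max(..., key=len) and discard every candidate overlapping it, so no sort and no index are built at all.
import Mathlib
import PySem

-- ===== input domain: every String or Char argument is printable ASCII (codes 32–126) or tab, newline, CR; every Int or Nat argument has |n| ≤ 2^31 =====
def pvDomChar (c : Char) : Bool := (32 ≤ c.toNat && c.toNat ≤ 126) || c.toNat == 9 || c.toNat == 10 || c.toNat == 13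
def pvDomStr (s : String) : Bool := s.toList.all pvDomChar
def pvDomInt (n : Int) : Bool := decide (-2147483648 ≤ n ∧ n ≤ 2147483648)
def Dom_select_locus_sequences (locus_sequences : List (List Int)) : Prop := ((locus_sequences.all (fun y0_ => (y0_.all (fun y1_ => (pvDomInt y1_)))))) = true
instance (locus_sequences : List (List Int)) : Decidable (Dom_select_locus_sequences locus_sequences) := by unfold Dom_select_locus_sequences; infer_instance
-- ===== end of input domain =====

-- B replaces A's length-keyed bucket dict and sorted-keys nested traversal by selection-by-
-- extraction: filter the short alignments once, then repeatedly take the longest remaining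
-- candidate (stable max) and discard everything overlapping it — no sort, no index (objective: faster, measured).

-- ===== PORT A =====
def select_locus_sequences (locus_sequences : List (List Int)) : List (List Int) :=
  -- alignment_score_groups: dict built by append-or-create, i.e. modify with default []
  let alignment_score_groups : PySem.Dict Int (List (List Int)) :=
    locus_sequences.foldl
      (fun d alignment => d.modify (PySem.List.len alignment) [] (fun g => g ++ [alignment]))
      PySem.Dict.empty
  (PySem.List.sorted alignment_score_groups.keys (fun k => k) true).foldl
    (fun best_alignments score_group =>
      (alignment_score_groups.getD score_group []).foldl
        (fun best_alignments alignment =>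
          if PySem.List.len alignment < 3 then best_alignments
          else if best_alignments.any (fun a => alignment.any (fun p => a.contains p)) then
            best_alignments
          else best_alignments ++ [alignment])
        best_alignments)
    []

-- ===== PORT B =====
-- the while loop of Source B, with fuel = |candidates| (each pass drops at least the picked
-- alignment, which is nonempty since every candidate has length >= 3, so the fuel suffices)
def pvSelGo : Nat → List (List Int) → List (List Int)
  | 0, _ => []
  | Nat.succ n, candidates =>
    match PySem.List.max? candidates (fun a => PySem.List.len a) with
    | none => []
    | some pick =>
      let picked := PySem.Set.ofList pick
      pick :: pvSelGo n (candidates.filter (fun a => !(a.any (fun p => picked.contains p))))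

def select_locus_sequences_alt (locus_sequences : List (List Int)) : List (List Int) :=
  let candidates := locus_sequences.filter (fun alignment => decide (3 ≤ PySem.List.len alignment))
  pvSelGo candidates.length candidates

-- ===== PRECONDITION & SPEC =====
def Spec_select_locus_sequences (locus_sequences : List (List Int)) (out : List (List Int)) : Prop := out = select_locus_sequences_alt locus_sequences
instance (locus_sequences : List (List Int)) (out : List (List Int)) : Decidable (Spec_select_locus_sequences locus_sequences out) := by unfold Spec_select_locus_sequences; infer_instance

-- ===== CLAIM (what is proved, stated in full; the proofs are below) =====
def Claim_equal_select_locus_sequences : Prop := ∀ (locus_sequences : List (List Int)), Dom_select_locus_sequences locus_sequences → Spec_select_locus_sequences locus_sequences (select_locus_sequences locus_sequences)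

-- ===== LEMMAS AND PROOFS =====

-- named forms of the two loop bodies (A's inner step, and the step without the length test)
def stepA (best : List (List Int)) (alignment : List Int) : List (List Int) :=
  if PySem.List.len alignment < 3 then best
  else if best.any (fun a => alignment.any (fun p => a.contains p)) then best
  else best ++ [alignment]

def stepS (best : List (List Int)) (alignment : List Int) : List (List Int) :=
  if best.any (fun a => alignment.any (fun p => a.contains p)) then best
  else best ++ [alignment]

-- ---------- part 1: A equals a greedy fold over the stable descending-length sort ----------

-- insert a new key into a strictly descending key list, keeping it descending
def insDesc (c : Int) (K : List Int) : List Int :=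
  K.takeWhile (fun j => decide (c < j)) ++ c :: K.dropWhile (fun j => decide (c < j))

-- the grouping fold reads back as a filter
theorem getD_grouping (l : List (List Int)) (d : PySem.Dict Int (List (List Int))) (k : Int) :
    (l.foldl (fun d a => d.modify (PySem.List.len a) [] (fun g => g ++ [a])) d).getD k []
      = d.getD k [] ++ l.filter (fun a => PySem.List.len a == k) := by
  induction l generalizing d with
  | nil => simp
  | cons a t ih =>
    simp only [List.foldl_cons, List.filter_cons]
    rw [ih, PySem.Dict.getD_modify]
    by_cases h : PySem.List.len a = k
    · subst h
      simp [List.append_assoc]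
    · have hb : (PySem.List.len a == k) = false := beq_eq_false_iff_ne.mpr h
      rw [if_neg (fun hh => h hh.symm), hb]
      simp

-- the dict keys are the distinct lengths, in first-appearance order
theorem keys_grouping (l : List (List Int)) :
    (l.foldl (fun d a => d.modify (PySem.List.len a) [] (fun g => g ++ [a])) PySem.Dict.empty).keys
      = PySem.Set.ofList (l.map (fun a => PySem.List.len a)) := by
  rw [PySem.Dict.keys_foldl_modify_key l (fun a => PySem.List.len a) [] (fun _ a => fun g => g ++ [a]) PySem.Dict.empty]
  rfl

-- a nested fold over buckets is a fold over their concatenation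
theorem foldl_flatMap {α β γ : Type} (K : List γ) (g : γ → List α) (f : β → α → β) (init : β) :
    K.foldl (fun b k => (g k).foldl f b) init = (K.flatMap g).foldl f init := by
  induction K generalizing init with
  | nil => rfl
  | cons k t ih => simp [List.foldl_append, ih]

theorem flatMap_congr_mem {α β : Type} (K : List α) (f g : α → List β)
    (h : ∀ k ∈ K, f k = g k) : K.flatMap f = K.flatMap g := by
  induction K with
  | nil => rfl
  | cons k t ih => simp [List.flatMap_cons, h k (by simp), ih (fun k hk => h k (by simp [hk]))]

theorem insertBy_append_left {α : Type} (before : α → α → Bool) (x : α) (ys zs : List α)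
    (h : ∀ y ∈ ys, before x y = false) :
    PySem.List.insertBy before x (ys ++ zs) = ys ++ PySem.List.insertBy before x zs := by
  induction ys with
  | nil => rfl
  | cons y t ih =>
    simp only [List.cons_append, PySem.List.insertBy, h y (by simp)]
    simp [ih (fun y hy => h y (by simp [hy]))]

theorem insertBy_all_before {α : Type} (before : α → α → Bool) (x : α) (ys : List α)
    (h : ∀ y ∈ ys, before x y = true) :
    PySem.List.insertBy before x ys = x :: ys := by
  cases ys with
  | nil => rfl
  | cons y t => simp [PySem.List.insertBy, h y (by simp)]

-- inserting an alignment whose length is an existing key appends it to that bucket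
theorem insert_mem (K : List Int) (x : List Int) (F : Int → List (List Int))
    (hK : K.Pairwise (fun a b => b < a))
    (HF : ∀ k ∈ K, ∀ a ∈ F k, PySem.List.len a = k)
    (hmem : PySem.List.len x ∈ K) :
    PySem.List.insertBy (fun a b => decide (PySem.List.len b < PySem.List.len a)) x (K.flatMap F)
      = K.flatMap (fun k => if k = PySem.List.len x then F k ++ [x] else F k) := by
  induction K with
  | nil => cases hmem
  | cons k0 t ih =>
    have hhead : ∀ j ∈ t, j < k0 := (List.pairwise_cons.mp hK).1
    by_cases hc : PySem.List.len x = k0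
    · -- strip the k0 bucket (equal lengths: no strict <), then everything after is shorter
      have h1 : ∀ y ∈ F k0, (fun a b => decide (PySem.List.len b < PySem.List.len a)) x y = false := by
        intro y hy
        have hky := HF k0 (by simp) y hy
        have hyx : PySem.List.len y = PySem.List.len x := by rw [hky, hc]
        simp only [decide_eq_false_iff_not, not_lt, hyx, le_refl]
      have h2 : ∀ y ∈ t.flatMap F, decide (PySem.List.len y < PySem.List.len x) = true := by
        intro y hy
        obtain ⟨j, hj, hyj⟩ := List.mem_flatMap.mp hy
        have hky := HF j (by simp [hj]) y hyj
        simp only [decide_eq_true_eq]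
        rw [hky, hc]
        exact hhead j hj
      have hne : ∀ j ∈ t, j ≠ PySem.List.len x := by
        intro j hj h
        have := hhead j hj
        rw [h, hc] at this
        exact lt_irrefl _ this
      rw [List.flatMap_cons, insertBy_append_left _ _ _ _ h1,
        insertBy_all_before _ _ _ h2]
      rw [List.flatMap_cons, if_pos hc.symm,
        flatMap_congr_mem t _ F (fun j hj => if_neg (hne j hj))]
      simp
    · -- length is deeper in the list: strip the k0 bucket and recurse
      have hmem' : PySem.List.len x ∈ t := by
        cases List.mem_cons.mp hmem with
        | inl h => exact absurd h hc
        | inr h => exact h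
      have hlt : PySem.List.len x < k0 := hhead _ hmem'
      have h1 : ∀ y ∈ F k0, (fun a b => decide (PySem.List.len b < PySem.List.len a)) x y = false := by
        intro y hy
        have hky := HF k0 (by simp) y hy
        simp only [decide_eq_false_iff_not, not_lt]
        rw [hky]
        exact le_of_lt hlt
      rw [List.flatMap_cons, insertBy_append_left _ _ _ _ h1,
        ih (List.pairwise_cons.mp hK).2 (fun j hj a ha => HF j (by simp [hj]) a ha) hmem']
      rw [List.flatMap_cons, if_neg (fun h => hc h.symm)]

-- inserting an alignment with a fresh length opens a new bucket at the right place
theorem insert_new (K : List Int) (x : List Int) (F : Int → List (List Int))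
    (hK : K.Pairwise (fun a b => b < a))
    (HF : ∀ k ∈ K, ∀ a ∈ F k, PySem.List.len a = k)
    (hmem : PySem.List.len x ∉ K) :
    PySem.List.insertBy (fun a b => decide (PySem.List.len b < PySem.List.len a)) x (K.flatMap F)
      = (insDesc (PySem.List.len x) K).flatMap
          (fun k => if k = PySem.List.len x then [x] else F k) := by
  induction K with
  | nil => simp [insDesc, PySem.List.insertBy]
  | cons k0 t ih =>
    have hhead : ∀ j ∈ t, j < k0 := (List.pairwise_cons.mp hK).1
    have hc : PySem.List.len x ≠ k0 := fun h => hmem (List.mem_cons.mpr (Or.inl h))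
    by_cases hlt : PySem.List.len x < k0
    · have h1 : ∀ y ∈ F k0, (fun a b => decide (PySem.List.len b < PySem.List.len a)) x y = false := by
        intro y hy
        have hky := HF k0 (by simp) y hy
        simp only [decide_eq_false_iff_not, not_lt]
        rw [hky]
        exact le_of_lt hlt
      have hins : insDesc (PySem.List.len x) (k0 :: t) = k0 :: insDesc (PySem.List.len x) t := by
        have hd : decide (PySem.List.len x < k0) = true := decide_eq_true hlt
        simp only [insDesc, List.takeWhile_cons, List.dropWhile_cons, hd]
        simp
      rw [List.flatMap_cons, insertBy_append_left _ _ _ _ h1,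
        ih (List.pairwise_cons.mp hK).2 (fun j hj a ha => HF j (by simp [hj]) a ha)
          (fun h => hmem (List.mem_cons.mpr (Or.inr h))), hins, List.flatMap_cons,
        if_neg (fun h : k0 = _ => hc h.symm)]
    · -- the new length is the largest so far: it goes in front
      have hgt : k0 < PySem.List.len x := lt_of_le_of_ne (not_lt.mp hlt) hc.symm
      have h2 : ∀ y ∈ (k0 :: t).flatMap F, decide (PySem.List.len y < PySem.List.len x) = true := by
        intro y hy
        obtain ⟨j, hj, hyj⟩ := List.mem_flatMap.mp hy
        have hkey := HF j hj y hyj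
        have hjle : j ≤ k0 := by
          cases List.mem_cons.mp hj with
          | inl h => exact le_of_eq h
          | inr h => exact le_of_lt (hhead j h)
        simp only [decide_eq_true_eq]
        rw [hkey]
        exact lt_of_le_of_lt hjle hgt
      have hne : ∀ j ∈ k0 :: t, j ≠ PySem.List.len x := by
        intro j hj h; exact hmem (h ▸ hj)
      have hins : insDesc (PySem.List.len x) (k0 :: t) = PySem.List.len x :: k0 :: t := by
        have hd : decide (PySem.List.len x < k0) = false := decide_eq_false hlt
        simp only [insDesc, List.takeWhile_cons, List.dropWhile_cons, hd]
        simp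
      have hrhs : List.flatMap (fun k => if k = PySem.List.len x then [x] else F k)
          (PySem.List.len x :: k0 :: t) = x :: List.flatMap F (k0 :: t) := by
        rw [List.flatMap_cons, if_pos rfl,
          flatMap_congr_mem (k0 :: t) _ F (fun j hj => if_neg (hne j hj))]
        simp
      rw [insertBy_all_before _ _ _ h2, hins, hrhs]

-- elements dropped by the takeWhile are strictly below the new key
theorem dropWhile_lt (K : List Int) (c : Int) (hK : K.Pairwise (fun a b => b < a))
    (hc : c ∉ K) : ∀ b ∈ K.dropWhile (fun j => decide (c < j)), b < c := by
  induction K with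
  | nil => intro b hb; cases hb
  | cons k0 t ih =>
    have hhead : ∀ j ∈ t, j < k0 := (List.pairwise_cons.mp hK).1
    intro b hb
    by_cases h : c < k0
    · rw [List.dropWhile_cons, if_pos (by simpa using h)] at hb
      exact ih (List.pairwise_cons.mp hK).2 (fun hh => hc (by simp [hh])) b hb
    · rw [List.dropWhile_cons, if_neg (by simpa using h)] at hb
      have hk0 : k0 < c := lt_of_le_of_ne (not_lt.mp h) (fun hh => hc (by simp [hh.symm]))
      cases List.mem_cons.mp hb with
      | inl hh => exact hh ▸ hk0
      | inr hh => exact lt_trans (hhead b hh) hk0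

-- sorting the key set with the new key appended IS the ordered insertion
theorem sorted_insDesc (S : List Int) (c : Int)
    (hndS : S.Nodup) (hc : c ∉ S) :
    PySem.List.sorted (S ++ [c]) (fun k => k) true
      = insDesc c (PySem.List.sorted S (fun k => k) true) := by
  set K := PySem.List.sorted S (fun k => k) true with hKdef
  have hperm : K.Perm S := PySem.List.sorted_perm S (fun k => k) true
  have hnd : K.Nodup := hperm.nodup_iff.mpr hndS
  have hle : K.Pairwise (fun a b => b ≤ a) := PySem.List.sorted_pairwise_rev S (fun k => k)
  have hK : K.Pairwise (fun a b => b < a) := by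
    have := List.Pairwise.and hle hnd
    exact this.imp (fun h => lt_of_le_of_ne h.1 (Ne.symm h.2))
  have hcK : c ∉ K := fun h => hc (hperm.mem_iff.mp h)
  apply PySem.List.sorted_rev_eq_of_perm_of_pairwise_gt
  · -- permutation: insDesc c K ~ c :: K ~ c :: S ~ S ++ [c]
    have h1 : (insDesc c K).Perm (c :: K) := by
      have h := List.perm_middle (a := c) (l₁ := K.takeWhile (fun j => decide (c < j)))
        (l₂ := K.dropWhile (fun j => decide (c < j)))
      rw [List.takeWhile_append_dropWhile] at h
      exact h
    exact (h1.trans (hperm.cons c)).trans (List.perm_append_singleton c S).symm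
  · -- strictly descending
    apply List.pairwise_append.mpr
    refine ⟨hK.sublist (List.takeWhile_sublist _), ?_, ?_⟩
    · apply List.pairwise_cons.mpr
      exact ⟨dropWhile_lt K c hK hcK, hK.sublist (List.dropWhile_sublist _)⟩
    · intro a ha b hb
      have hca : c < a := by simpa using List.mem_takeWhile_imp ha
      cases List.mem_cons.mp hb with
      | inl h => exact h ▸ hca
      | inr h => exact lt_trans (dropWhile_lt K c hK hcK b h) hca

-- CORE 1: the stable descending-length sort is the buckets concatenated in descending key order
theorem sorted_eq_buckets (l : List (List Int)) :
    PySem.List.sorted l (fun a => PySem.List.len a) true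
      = (PySem.List.sorted (PySem.Set.ofList (l.map (fun a => PySem.List.len a))) (fun k => k) true).flatMap
          (fun k => l.filter (fun a => PySem.List.len a == k)) := by
  induction l using List.reverseRecOn with
  | nil => rfl
  | append_singleton l x ih =>
    set key := fun a : List Int => PySem.List.len a with hkey
    set S := PySem.Set.ofList (l.map key) with hS
    set K := PySem.List.sorted S (fun k => k) true with hKdef
    have hperm : K.Perm S := PySem.List.sorted_perm S (fun k => k) true
    have hndS : S.Nodup := PySem.Set.nodup_ofList _
    have hnd : K.Nodup := hperm.nodup_iff.mpr hndS
    have hK : K.Pairwise (fun a b => b < a) := by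
      have hle : K.Pairwise (fun a b => b ≤ a) := PySem.List.sorted_pairwise_rev S (fun k => k)
      exact (List.Pairwise.and hle hnd).imp (fun h => lt_of_le_of_ne h.1 (Ne.symm h.2))
    have HF : ∀ k ∈ K, ∀ a ∈ l.filter (fun a => key a == k), key a = k := by
      intro k _ a ha
      exact beq_iff_eq.mp (List.mem_filter.mp ha).2
    have hmapx : (l ++ [x]).map key = l.map key ++ [key x] := by simp
    have hmemS : key x ∈ K ↔ key x ∈ l.map key := by
      rw [hperm.mem_iff, hS, PySem.Set.mem_ofList]
    -- LHS: one more insertion into the sorted prefix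
    have hlhs : PySem.List.sorted (l ++ [x]) key true
        = PySem.List.insertBy (fun a b => decide (key b < key a)) x
            (PySem.List.sorted l key true) := by
      rw [PySem.List.sorted_rev_eq_foldl_insertBy, List.foldl_append,
        ← PySem.List.sorted_rev_eq_foldl_insertBy]
      rfl
    -- RHS bucket contents after the append
    have hfilter : ∀ k, (l ++ [x]).filter (fun a => key a == k)
        = l.filter (fun a => key a == k) ++ (if key x = k then [x] else []) := by
      intro k
      rw [List.filter_append, List.filter_singleton]
      by_cases h : key x = k
      · rw [if_pos h, show (key x == k) = true from beq_iff_eq.mpr h]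
        rfl
      · rw [if_neg h, show (key x == k) = false from beq_eq_false_iff_ne.mpr h]
        rfl
    by_cases hmem : key x ∈ K
    · -- existing length: the key set (hence its sorted order) is unchanged
      have hofla : PySem.Set.ofList (List.map key l ++ [key x])
          = PySem.Set.add (PySem.Set.ofList (List.map key l)) (key x) := by
        show (List.map key l ++ [key x]).foldl PySem.Set.add PySem.Set.empty = _
        rw [List.foldl_append]
        rfl
      have hofl : PySem.Set.ofList ((l ++ [x]).map key) = S := by
        rw [hmapx, hofla,
          PySem.Set.add_of_mem ((PySem.Set.mem_ofList _ _).mpr (hmemS.mp hmem))]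
      rw [hlhs, ih, insert_mem K x _ hK HF hmem, hofl, ← hKdef]
      apply flatMap_congr_mem
      intro k hk
      rw [hfilter k]
      by_cases h : k = key x
      · subst h
        rw [if_pos rfl, if_pos rfl]
      · rw [if_neg (fun hh : key x = k => h hh.symm), if_neg h, List.append_nil]
    · -- fresh length: the sorted key list gains one entry at its ordered position
      have hcS : key x ∉ S := fun h => hmem (hperm.mem_iff.mpr h)
      have hofla : PySem.Set.ofList (List.map key l ++ [key x])
          = PySem.Set.add (PySem.Set.ofList (List.map key l)) (key x) := by
        show (List.map key l ++ [key x]).foldl PySem.Set.add PySem.Set.empty = _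
        rw [List.foldl_append]
        rfl
      have hofl : PySem.Set.ofList ((l ++ [x]).map key) = S ++ [key x] := by
        rw [hmapx, hofla, PySem.Set.add_of_not_mem (hS ▸ hcS)]
      rw [hlhs, ih, insert_new K x _ hK HF hmem, hofl,
        sorted_insDesc S (key x) hndS hcS, ← hKdef]
      apply flatMap_congr_mem
      intro k hk
      rw [hfilter k]
      by_cases h : k = key x
      · subst h
        have hnil : l.filter (fun a => key a == key x) = [] := by
          apply List.filter_eq_nil_iff.mpr
          intro a ha hba
          exact hcS (hS ▸ (PySem.Set.mem_ofList _ _).mpr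
            (List.mem_map.mpr ⟨a, ha, beq_iff_eq.mp hba⟩))
        rw [hnil, if_pos rfl]
        rfl
      · rw [if_neg (fun hh : key x = k => h hh.symm), if_neg h, List.append_nil]

-- A is the greedy fold over the stable descending-length sort
theorem A_eq_sortedFold (l : List (List Int)) :
    select_locus_sequences l
      = (PySem.List.sorted l (fun a => PySem.List.len a) true).foldl stepA [] := by
  simp only [select_locus_sequences]
  unfold stepA
  rw [keys_grouping l, foldl_flatMap]
  rw [sorted_eq_buckets l]
  congr 1
  apply flatMap_congr_mem
  intro k _
  rw [getD_grouping l PySem.Dict.empty k]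
  simp

-- ---------- part 2: the sorted greedy fold equals B's extraction loop ----------

theorem insertBy_cons_pos (x y : List Int) (ys : List (List Int))
    (h : PySem.List.len y < PySem.List.len x) :
    PySem.List.insertBy (fun a b => decide (PySem.List.len b < PySem.List.len a)) x (y :: ys)
      = x :: y :: ys := by
  have hbt : (fun a b : List Int => decide (PySem.List.len b < PySem.List.len a)) x y = true :=
    decide_eq_true h
  simp only [PySem.List.insertBy, hbt, if_true]

theorem insertBy_cons_neg (x y : List Int) (ys : List (List Int))
    (h : ¬ PySem.List.len y < PySem.List.len x) :
    PySem.List.insertBy (fun a b => decide (PySem.List.len b < PySem.List.len a)) x (y :: ys)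
      = y :: PySem.List.insertBy (fun a b => decide (PySem.List.len b < PySem.List.len a)) x ys := by
  have hbf : (fun a b : List Int => decide (PySem.List.len b < PySem.List.len a)) x y = false :=
    decide_eq_false h
  simp only [PySem.List.insertBy, hbf, Bool.false_eq_true, if_false]

-- the length test inside A's step is a one-time filter
theorem foldA_eq_foldS_filter (s : List (List Int)) (acc : List (List Int)) :
    s.foldl stepA acc
      = (s.filter (fun alignment => decide (3 ≤ PySem.List.len alignment))).foldl stepS acc := by
  induction s generalizing acc with
  | nil => rfl
  | cons a t ih =>
    simp only [List.foldl_cons, List.filter_cons]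
    by_cases h : PySem.List.len a < 3
    · have hd : decide ((3:Int) ≤ PySem.List.len a) = false := decide_eq_false (by omega)
      rw [hd, if_neg Bool.false_ne_true,
        show stepA acc a = acc from by unfold stepA; rw [if_pos h]]
      exact ih acc
    · have hd : decide ((3:Int) ≤ PySem.List.len a) = true := decide_eq_true (by omega)
      rw [hd, if_pos rfl, List.foldl_cons,
        show stepA acc a = stepS acc a from by unfold stepA stepS; rw [if_neg h]]
      exact ih (stepS acc a)

-- filtering commutes with the stable insertion into a descending-sorted list
theorem filter_insertBy (q : List Int → Bool) (x : List Int) (acc : List (List Int))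
    (hacc : acc.Pairwise (fun a b => PySem.List.len b ≤ PySem.List.len a)) :
    (PySem.List.insertBy (fun a b => decide (PySem.List.len b < PySem.List.len a)) x acc).filter q
      = if q x then
          PySem.List.insertBy (fun a b => decide (PySem.List.len b < PySem.List.len a)) x (acc.filter q)
        else acc.filter q := by
  induction acc with
  | nil =>
    by_cases hq : q x <;> simp [PySem.List.insertBy, hq]
  | cons y ys ih =>
    have hys : ∀ z ∈ ys, PySem.List.len z ≤ PySem.List.len y := (List.pairwise_cons.mp hacc).1
    have htl := (List.pairwise_cons.mp hacc).2
    by_cases hb : PySem.List.len y < PySem.List.len x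
    · have hall : ∀ z ∈ (y :: ys).filter q,
          (fun a b => decide (PySem.List.len b < PySem.List.len a)) x z = true := by
        intro z hz
        have hzle : PySem.List.len z ≤ PySem.List.len y := by
          cases List.mem_cons.mp (List.mem_of_mem_filter hz) with
          | inl h => exact le_of_eq (by rw [h])
          | inr h => exact hys z h
        exact decide_eq_true (lt_of_le_of_lt hzle hb)
      rw [insertBy_cons_pos x y ys hb]
      by_cases hq : q x
      · have e1 : List.filter q (x :: y :: ys) = x :: List.filter q (y :: ys) := by
          simp [List.filter_cons, hq]
        rw [e1, if_pos hq, insertBy_all_before _ _ _ hall]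
      · have hqf : q x = false := Bool.eq_false_iff.mpr hq
        have e1 : List.filter q (x :: y :: ys) = List.filter q (y :: ys) := by
          simp [List.filter_cons, hqf]
        rw [e1, if_neg hq]
    · rw [insertBy_cons_neg x y ys hb]
      by_cases hy : q y
      · have e1 : List.filter q
              (y :: PySem.List.insertBy (fun a b => decide (PySem.List.len b < PySem.List.len a)) x ys)
            = y :: List.filter q
                (PySem.List.insertBy (fun a b => decide (PySem.List.len b < PySem.List.len a)) x ys) := by
          simp [List.filter_cons, hy]
        have e2 : List.filter q (y :: ys) = y :: List.filter q ys := by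
          simp [List.filter_cons, hy]
        rw [e1, e2, ih htl]
        by_cases hq : q x
        · rw [if_pos hq, if_pos hq, insertBy_cons_neg x y (ys.filter q) hb]
        · rw [if_neg hq, if_neg hq]
      · have hyf : q y = false := Bool.eq_false_iff.mpr hy
        have e1 : List.filter q
              (y :: PySem.List.insertBy (fun a b => decide (PySem.List.len b < PySem.List.len a)) x ys)
            = List.filter q
                (PySem.List.insertBy (fun a b => decide (PySem.List.len b < PySem.List.len a)) x ys) := by
          simp [List.filter_cons, hyf]
        have e2 : List.filter q (y :: ys) = List.filter q ys := by
          simp [List.filter_cons, hyf]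
        rw [e1, e2, ih htl]

-- filtering commutes with the stable descending-length sort
theorem filter_sorted_rev (q : List Int → Bool) (l : List (List Int)) :
    (PySem.List.sorted l (fun a => PySem.List.len a) true).filter q
      = PySem.List.sorted (l.filter q) (fun a => PySem.List.len a) true := by
  induction l using List.reverseRecOn with
  | nil => rfl
  | append_singleton l x ih =>
    have hlhs : PySem.List.sorted (l ++ [x]) (fun a => PySem.List.len a) true
        = PySem.List.insertBy (fun a b => decide (PySem.List.len b < PySem.List.len a)) x
            (PySem.List.sorted l (fun a => PySem.List.len a) true) := by
      rw [PySem.List.sorted_rev_eq_foldl_insertBy, List.foldl_append,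
        ← PySem.List.sorted_rev_eq_foldl_insertBy]
      rfl
    rw [hlhs, filter_insertBy q x _ (PySem.List.sorted_pairwise_rev l _), List.filter_append]
    by_cases hq : q x
    · have hfx : List.filter q [x] = [x] := by simp [List.filter_cons, hq]
      have hr : PySem.List.sorted (l.filter q ++ [x]) (fun a => PySem.List.len a) true
          = PySem.List.insertBy (fun a b => decide (PySem.List.len b < PySem.List.len a)) x
              (PySem.List.sorted (l.filter q) (fun a => PySem.List.len a) true) := by
        rw [PySem.List.sorted_rev_eq_foldl_insertBy, List.foldl_append,
          ← PySem.List.sorted_rev_eq_foldl_insertBy]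
        rfl
      rw [if_pos hq, hfx, hr, ih]
    · have hqf : q x = false := Bool.eq_false_iff.mpr hq
      have hfx : List.filter q [x] = [] := by simp [List.filter_cons, hqf]
      rw [if_neg hq, hfx, List.append_nil, ih]

-- cons-step of filter, with the condition supplied as a Bool equation
theorem filter_cons_true {α : Type} (p : α → Bool) (a : α) (t : List α) (h : p a = true) :
    (a :: t).filter p = a :: t.filter p := by
  simp [List.filter_cons, h]

theorem filter_cons_false {α : Type} (p : α → Bool) (a : α) (t : List α) (h : p a = false) :
    (a :: t).filter p = t.filter p := by
  simp [List.filter_cons, h]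

-- pulling an accepted prefix out of the greedy fold: later items overlapping it are skipped
theorem foldS_append_acc (s : List (List Int)) (acc1 : List (List Int)) :
    ∀ acc2 : List (List Int),
      s.foldl stepS (acc1 ++ acc2)
        = acc1 ++ (s.filter
            (fun a => !(acc1.any (fun b => a.any (fun p => b.contains p))))).foldl stepS acc2 := by
  induction s with
  | nil => intro acc2; rfl
  | cons a t ih =>
    intro acc2
    rw [List.foldl_cons]
    by_cases h1 : acc1.any (fun b => a.any (fun p => b.contains p))
    · have hc : (acc1 ++ acc2).any (fun b => a.any (fun p => b.contains p)) = true := by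
        rw [List.any_append, h1, Bool.true_or]
      have hstep : stepS (acc1 ++ acc2) a = acc1 ++ acc2 := by
        unfold stepS; rw [if_pos hc]
      have hfilt : List.filter (fun a => !(acc1.any (fun b => a.any (fun p => b.contains p)))) (a :: t)
          = List.filter (fun a => !(acc1.any (fun b => a.any (fun p => b.contains p)))) t :=
        filter_cons_false _ a t (by simp only [h1, Bool.not_true])
      rw [hstep, hfilt]
      exact ih acc2
    · have hb1 : acc1.any (fun b => a.any (fun p => b.contains p)) = false := Bool.eq_false_iff.mpr h1
      have hfilt : List.filter (fun a => !(acc1.any (fun b => a.any (fun p => b.contains p)))) (a :: t)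
          = a :: List.filter (fun a => !(acc1.any (fun b => a.any (fun p => b.contains p)))) t :=
        filter_cons_true _ a t (by simp only [hb1, Bool.not_false])
      rw [hfilt, List.foldl_cons]
      by_cases h2 : acc2.any (fun b => a.any (fun p => b.contains p))
      · have hc : (acc1 ++ acc2).any (fun b => a.any (fun p => b.contains p)) = true := by
          rw [List.any_append, hb1, h2, Bool.false_or]
        have hstep : stepS (acc1 ++ acc2) a = acc1 ++ acc2 := by
          unfold stepS; rw [if_pos hc]
        have hstep2 : stepS acc2 a = acc2 := by
          unfold stepS; rw [if_pos h2]
        rw [hstep, hstep2]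
        exact ih acc2
      · have hb2 : acc2.any (fun b => a.any (fun p => b.contains p)) = false := Bool.eq_false_iff.mpr h2
        have hc : (acc1 ++ acc2).any (fun b => a.any (fun p => b.contains p)) = false := by
          rw [List.any_append, hb1, hb2, Bool.false_or]
        have hstep : stepS (acc1 ++ acc2) a = acc1 ++ (acc2 ++ [a]) := by
          unfold stepS
          rw [if_neg (by rw [hc]; exact Bool.false_ne_true), List.append_assoc]
        have hstep2 : stepS acc2 a = acc2 ++ [a] := by
          unfold stepS; rw [if_neg (by rw [hb2]; exact Bool.false_ne_true)]
        rw [hstep, hstep2]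
        exact ih (acc2 ++ [a])

-- the head of the stable descending sort is Python's max(..., key=len): the first longest one
theorem head?_sorted_rev_eq_max? (l : List (List Int)) :
    (PySem.List.sorted l (fun a => PySem.List.len a) true).head?
      = PySem.List.max? l (fun a => PySem.List.len a) := by
  induction l using List.reverseRecOn with
  | nil => rfl
  | append_singleton l x ih =>
    have hlhs : PySem.List.sorted (l ++ [x]) (fun a => PySem.List.len a) true
        = PySem.List.insertBy (fun a b => decide (PySem.List.len b < PySem.List.len a)) x
            (PySem.List.sorted l (fun a => PySem.List.len a) true) := by
      rw [PySem.List.sorted_rev_eq_foldl_insertBy, List.foldl_append,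
        ← PySem.List.sorted_rev_eq_foldl_insertBy]
      rfl
    cases hM : PySem.List.max? l (fun a => PySem.List.len a) with
    | none =>
      have hnil : l = [] := (PySem.List.max?_eq_none_iff _ _).mp hM
      subst hnil
      rfl
    | some m =>
      have hmx : PySem.List.max? (l ++ [x]) (fun a => PySem.List.len a)
          = if PySem.List.len m < PySem.List.len x then some x else some m := by
        unfold PySem.List.max? at hM ⊢
        rw [List.foldl_append, hM]
        rfl
      rw [hlhs, hmx]
      rw [hM] at ih
      cases hs : PySem.List.sorted l (fun a => PySem.List.len a) true with
      | nil => rw [hs] at ih; cases ih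
      | cons h t =>
        rw [hs] at ih
        have hhm : h = m := by simpa using ih
        subst hhm
        by_cases hlt : PySem.List.len h < PySem.List.len x
        · rw [insertBy_cons_pos x h t hlt]
          show some x = if PySem.List.len h < PySem.List.len x then some x else some h
          rw [if_pos hlt]
        · rw [insertBy_cons_neg x h t hlt]
          show some h = if PySem.List.len h < PySem.List.len x then some x else some h
          rw [if_neg hlt]

-- CORE 2: B's extraction loop computes the greedy fold over the stable descending sort
theorem selGo_eq_sortedFold (n : Nat) :
    ∀ c : List (List Int), (∀ a ∈ c, (3:Int) ≤ PySem.List.len a) → c.length ≤ n →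
      pvSelGo n c = (PySem.List.sorted c (fun a => PySem.List.len a) true).foldl stepS [] := by
  induction n with
  | zero =>
    intro c _ hlen
    have hc : c = [] := List.eq_nil_iff_length_eq_zero.mpr (Nat.le_zero.mp hlen)
    subst hc
    rfl
  | succ n ih =>
    intro c h3 hlen
    cases hm : PySem.List.max? c (fun a => PySem.List.len a) with
    | none =>
      have hc : c = [] := (PySem.List.max?_eq_none_iff _ _).mp hm
      subst hc
      rfl
    | some m =>
      have hmem : m ∈ c := PySem.List.max?_mem hm
      have h3m : (3:Int) ≤ PySem.List.len m := h3 m hmem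
      have hmne : m ≠ [] := by
        intro h
        rw [h] at h3m
        norm_num [PySem.List.len] at h3m
      have hcont : ∀ p : Int, (PySem.Set.ofList m).contains p = m.contains p := by
        intro p
        by_cases hp : p ∈ m <;>
          simp [PySem.Set.contains_eq_listContains, PySem.Set.mem_ofList, hp]
      have hx : m.any (fun p => (PySem.Set.ofList m).contains p) = true := by
        obtain ⟨p, ps, hm0⟩ := List.exists_cons_of_ne_nil hmne
        apply List.any_eq_true.mpr
        refine ⟨p, by rw [hm0]; simp, ?_⟩
        rw [hcont p]
        exact List.contains_iff_mem.mpr (by rw [hm0]; simp)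
      have hPeq : (fun a : List Int => !(a.any (fun p => (PySem.Set.ofList m).contains p)))
          = fun a : List Int => !([m].any (fun b => a.any (fun p => b.contains p))) := by
        funext a
        simp only [List.any_cons, List.any_nil, Bool.or_false]
        rw [show (fun p => (PySem.Set.ofList m).contains p) = fun p => m.contains p from
          funext hcont]
      -- one unfolding of the while loop
      have hstep : pvSelGo (n + 1) c
          = m :: pvSelGo n
              (c.filter (fun a => !(a.any (fun p => (PySem.Set.ofList m).contains p)))) := by
        simp only [pvSelGo, hm]
      -- the sorted list starts with the picked alignment
      obtain ⟨t, ht⟩ : ∃ t, PySem.List.sorted c (fun a => PySem.List.len a) true = m :: t := by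
        have hh := head?_sorted_rev_eq_max? c
        rw [hm] at hh
        cases hs : PySem.List.sorted c (fun a => PySem.List.len a) true with
        | nil => rw [hs] at hh; cases hh
        | cons h t =>
          rw [hs] at hh
          exact ⟨t, by rw [← Option.some_inj.mp hh]⟩
      -- the tail, filtered for overlap with the pick, is the sorted filtered candidate list
      have htail : t.filter (fun a => !(a.any (fun p => (PySem.Set.ofList m).contains p)))
          = PySem.List.sorted
              (c.filter (fun a => !(a.any (fun p => (PySem.Set.ofList m).contains p))))
              (fun a => PySem.List.len a) true := by
        rw [← filter_sorted_rev, ht]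
        have e1 : List.filter (fun a => !(a.any (fun p => (PySem.Set.ofList m).contains p))) (m :: t)
            = List.filter (fun a => !(a.any (fun p => (PySem.Set.ofList m).contains p))) t :=
          filter_cons_false _ m t (by simp only [hx, Bool.not_true])
        rw [e1]
      -- fuel bookkeeping: the pick is dropped by its own filter
      have hlt : (c.filter (fun a => !(a.any (fun p => (PySem.Set.ofList m).contains p)))).length
          < c.length := by
        apply List.length_filter_lt_length_iff_exists.mpr
        refine ⟨m, hmem, ?_⟩
        simp only [hx, Bool.not_true]
        exact Bool.false_ne_true
      have hfuel :
          (c.filter (fun a => !(a.any (fun p => (PySem.Set.ofList m).contains p)))).length ≤ n := by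
        omega
      have h3' : ∀ a ∈ c.filter (fun a => !(a.any (fun p => (PySem.Set.ofList m).contains p))),
          (3:Int) ≤ PySem.List.len a := fun a ha => h3 a (List.mem_of_mem_filter ha)
      have hss0 : stepS [] m = [m] := by
        unfold stepS
        rw [if_neg (by rw [show (List.any ([] : List (List Int))
          (fun b => m.any (fun p => b.contains p))) = false from rfl]; exact Bool.false_ne_true)]
        rfl
      have happ := foldS_append_acc t [m] []
      rw [List.append_nil] at happ
      rw [hstep, ih _ h3' hfuel, ← htail, ht, List.foldl_cons, hss0, happ, ← hPeq]
      rfl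

-- ===== VERDICT (by name: the statement is the Claim_ definition above) =====
theorem select_locus_sequences_spec : Claim_equal_select_locus_sequences := by
  intro l _
  show select_locus_sequences l = select_locus_sequences_alt l
  rw [A_eq_sortedFold, foldA_eq_foldS_filter, filter_sorted_rev]
  rw [← selGo_eq_sortedFold
    ((l.filter (fun alignment => decide (3 ≤ PySem.List.len alignment))).length) _
    (fun a ha => of_decide_eq_true (List.mem_filter.mp ha).2) (le_refl _)]
  rfl
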